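-- pv_equiv track=rewrite | github.com/V-Paritosh/CS50-Python | 5-Problem Set/plates.py | end_num
-- ===== SOURCE A (Python) =====
-- def end_num(s):
--   num_start = False
--   for i in range(len(s)):
--     if s[i].isdigit():
--       if not num_start:
--         if s[i] == '0':
--           return False
--         num_start = True
--     elif num_start and not s[i].isdigit():
--       return False
--   return True
-- ===== SOURCE B (Python) =====
-- def end_num(s):
--   for i, c in enumerate(s):
--     if c.isdigit():
--       return c != '0' and s[i:].isdigit()
--   return True
-- ===== Notes on version B (the rewrite author's own statement) =====
-- stated objective: simpler
-- what changed: Replaces the running num_start flag loop by finding the first digit, rejecting a leading zero, and delegating the rest to a single s[i:].isdigit() call.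
import Mathlib
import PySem

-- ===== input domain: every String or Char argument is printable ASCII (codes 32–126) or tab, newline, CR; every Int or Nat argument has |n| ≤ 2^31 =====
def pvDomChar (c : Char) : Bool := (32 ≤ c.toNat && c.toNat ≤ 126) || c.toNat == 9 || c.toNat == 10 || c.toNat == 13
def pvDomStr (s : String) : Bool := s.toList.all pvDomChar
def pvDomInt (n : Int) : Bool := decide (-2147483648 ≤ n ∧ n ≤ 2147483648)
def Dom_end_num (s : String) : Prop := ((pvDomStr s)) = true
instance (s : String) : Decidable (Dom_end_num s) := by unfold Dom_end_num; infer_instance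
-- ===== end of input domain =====

-- B drops A's running num_start flag: it finds the first digit, rejects a leading '0',
-- and checks the remaining suffix with one all-digits test. Same O(n) cost, simpler.

-- ===== PORT A =====
-- the loop over range(len(s)) with the num_start flag and early returns
-- (Char.isDigit is exact for Python's str.isdigit on the ASCII domain)
def end_numGo (l : List Char) (numStart : Bool) : Bool :=
  match l with
  | [] => true
  | c :: cs =>
    if c.isDigit then
      if !numStart then
        if c = '0' then false else end_numGo cs true
      else end_numGo cs numStart
    else
      if numStart && !c.isDigit then false
      else end_numGo cs numStart

def end_num (s : String) : Bool := end_numGo s.toList false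

-- ===== PORT B =====
def end_num_alt (s : String) : Bool :=
  match s.toList.dropWhile (fun c => !c.isDigit) with
  | [] => true
  | c :: cs => (c != '0') && cs.all Char.isDigit

-- ===== PRECONDITION & SPEC =====
def Spec_end_num (s : String) (out : Bool) : Prop := out = end_num_alt s
instance (s : String) (out : Bool) : Decidable (Spec_end_num s out) := by unfold Spec_end_num; infer_instance

-- ===== CLAIM (what is proved, stated in full; the proofs are below) =====
def Claim_equal_end_num : Prop := ∀ (s : String), Dom_end_num s → Spec_end_num s (end_num s)

-- ===== LEMMAS AND PROOFS =====

-- once the flag is set, A's loop just checks that every remaining char is a digit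
theorem end_numGo_true (l : List Char) : end_numGo l true = l.all Char.isDigit := by
  induction l with
  | nil => rfl
  | cons c cs ih =>
    simp only [end_numGo, List.all_cons]
    by_cases h : c.isDigit <;> simp [h, ih]

theorem end_numGo_false (l : List Char) :
    end_numGo l false =
      (match l.dropWhile (fun c => !c.isDigit) with
       | [] => true
       | c :: cs => (c != '0') && cs.all Char.isDigit) := by
  induction l with
  | nil => rfl
  | cons c cs ih =>
    by_cases h : c.isDigit
    · by_cases h0 : c = '0' <;>
        simp [end_numGo, List.dropWhile_cons, h, h0, end_numGo_true]
    · simpa [end_numGo, List.dropWhile_cons, h] using ih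

-- ===== VERDICT (by name: the statement is the Claim_ definition above) =====
theorem end_num_spec : Claim_equal_end_num := by
  intro s _
  show end_num s = end_num_alt s
  simp [end_num, end_num_alt, end_numGo_false]
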